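-- pv_equiv track=rewrite | github.com/gsahlieh/frnsw-audio-challenge | script.py | find_longest_consecutive_count_and_order
-- ===== SOURCE A (Python) =====
-- def find_longest_consecutive_count_and_order(text_array_int):
--     """
--     Finds the longest consecutive count and checks if the words are out of order.
--
--     Parameters:
--     text_array_int (list): The array of integers to check.
--
--     Returns:
--     tuple: The longest consecutive count and a boolean indicating if the words are out of order.
--
--     Raises:
--     ValueError: If the input is not a list or if the list contains non-integer items.
--     """
--
--     if not text_array_int:
--         raise ValueError("Input must not be an empty list.")
--     if not all(isinstance(item, int) for item in text_array_int):
--         raise ValueError("Input must be an array of integers.")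
--     words_out_of_order = False
--     longest_consecutive_count = 0
--     current_consecutive_count = 1
--     previous_number = text_array_int[0]
--
--     for i in range(1, len(text_array_int)):
--         if text_array_int[i] < previous_number:
--             words_out_of_order = True
--
--         if text_array_int[i] == previous_number + 1:
--             current_consecutive_count += 1
--         else:
--             longest_consecutive_count = max(longest_consecutive_count, current_consecutive_count)
--             current_consecutive_count = 1
--
--         previous_number = text_array_int[i]
--
--     longest_consecutive_count = max(longest_consecutive_count, current_consecutive_count)
--     return longest_consecutive_count, words_out_of_order
-- ===== SOURCE B (Python) =====
-- def find_longest_consecutive_count_and_order(text_array_int):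
--     if not text_array_int:
--         raise ValueError("Input must not be an empty list.")
--     if not all(isinstance(item, int) for item in text_array_int):
--         raise ValueError("Input must be an array of integers.")
--     words_out_of_order = any(b < a for a, b in zip(text_array_int, text_array_int[1:]))
--     return max(_run_lengths(text_array_int)), words_out_of_order
--
--
-- def _run_lengths(arr):
--     """Lengths of the maximal consecutive runs of arr, in order."""
--     lengths = []
--     i = 0
--     n = len(arr)
--     while i < n:
--         j = i + 1
--         while j < n and arr[j] == arr[j - 1] + 1:
--             j += 1
--         lengths.append(j - i)
--         i = j
--     return lengths
-- ===== Notes on version B (the rewrite author's own statement) =====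
-- stated objective: alternative
-- what changed: Replaces A's single running-counter/accumulator loop by three separate passes: an adjacent-pair any() for the out-of-order flag, a grouping scan that materialises the list of maximal consecutive run lengths, and a max over that list.
import Mathlib
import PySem

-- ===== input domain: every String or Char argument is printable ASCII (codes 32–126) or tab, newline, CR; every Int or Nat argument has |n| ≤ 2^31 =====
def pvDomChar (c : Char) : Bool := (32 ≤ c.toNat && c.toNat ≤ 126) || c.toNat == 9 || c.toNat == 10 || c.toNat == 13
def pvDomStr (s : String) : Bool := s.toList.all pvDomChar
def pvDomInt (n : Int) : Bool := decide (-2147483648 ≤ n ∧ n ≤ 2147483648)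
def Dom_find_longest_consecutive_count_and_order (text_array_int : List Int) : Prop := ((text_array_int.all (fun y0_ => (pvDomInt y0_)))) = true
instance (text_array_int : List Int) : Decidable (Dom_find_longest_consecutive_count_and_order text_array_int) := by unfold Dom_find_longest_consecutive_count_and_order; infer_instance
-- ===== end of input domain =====

-- ===== PORT A =====
-- B differs from A by decomposition: A keeps a running counter and max-accumulator in one
-- loop; B computes the out-of-order flag, the list of maximal run lengths, and its max in
-- three separate passes. Both raise ValueError on [] (excluded by Pre_).

-- Port of A: the for-loop over range(1, len) reading text_array_int[i] and prev is the fold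
-- over the tail elements with state (words_out_of_order, longest, current, previous).
def find_longest_consecutive_count_and_order (text_array_int : List Int) : Int × Bool :=
  match text_array_int with
  | [] => (0, false)  -- unreachable under Pre_ (A raises ValueError)
  | x :: rest =>
    let st := rest.foldl
      (fun (s : Bool × Int × Int × Int) xi =>
        let ooo := if xi < s.2.2.2 then true else s.1
        let p := if xi = s.2.2.2 + 1 then (s.2.1, s.2.2.1 + 1)
                 else (max s.2.1 s.2.2.1, 1)
        (ooo, p.1, p.2, xi))
      (false, 0, 1, x)
    (max st.2.1 st.2.2.1, st.1)

-- ===== PORT B =====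
-- inner while of _run_lengths: j - i, the length of the maximal consecutive prefix
def pvRunPrefix : List Int → Nat
  | [] => 0
  | [_] => 1
  | a :: b :: t => if b = a + 1 then 1 + pvRunPrefix (b :: t) else 1

theorem pvRunPrefix_pos (a : Int) (t : List Int) : 1 ≤ pvRunPrefix (a :: t) := by
  cases t with
  | nil => simp [pvRunPrefix]
  | cons b t => simp only [pvRunPrefix]; split <;> omega

-- outer while of _run_lengths: the position i is represented by the remaining suffix
def pvRunLengths : List Int → List Int
  | [] => []
  | a :: t =>
    ((pvRunPrefix (a :: t) : Int)) :: pvRunLengths ((a :: t).drop (pvRunPrefix (a :: t)))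
  termination_by l => l.length
  decreasing_by
    have h := pvRunPrefix_pos a t
    simp [List.length_drop]; omega

-- Python max over the nonempty list of run lengths, ported by hand as a left fold of max
-- (exact for a nonempty list of Ints).
def find_longest_consecutive_count_and_order_alt (text_array_int : List Int) : Int × Bool :=
  match text_array_int with
  | [] => (0, false)  -- unreachable under Pre_ (B raises ValueError)
  | _ :: rest =>
    let words_out_of_order :=
      (text_array_int.zip rest).any (fun p => decide (p.2 < p.1))
    let longest :=
      match pvRunLengths text_array_int with
      | [] => 0  -- unreachable: text_array_int ≠ []
      | m :: ms => ms.foldl max m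
    (longest, words_out_of_order)

-- ===== PRECONDITION & SPEC =====
-- Pre_ excludes only the empty list, on which both A and B raise ValueError.
def Pre_find_longest_consecutive_count_and_order (text_array_int : List Int) : Prop :=
  text_array_int ≠ []
instance (text_array_int : List Int) : Decidable (Pre_find_longest_consecutive_count_and_order text_array_int) := by
  unfold Pre_find_longest_consecutive_count_and_order; infer_instance

def pvWitness_find_longest_consecutive_count_and_order : List Int := [3, 4, 5, 2]

def Spec_find_longest_consecutive_count_and_order (text_array_int : List Int) (out : Int × Bool) : Prop := out = find_longest_consecutive_count_and_order_alt text_array_int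
instance (text_array_int : List Int) (out : Int × Bool) : Decidable (Spec_find_longest_consecutive_count_and_order text_array_int out) := by unfold Spec_find_longest_consecutive_count_and_order; infer_instance

-- ===== CLAIM (what is proved, stated in full; the proofs are below) =====
def Claim_equal_find_longest_consecutive_count_and_order : Prop := ∀ (text_array_int : List Int), Dom_find_longest_consecutive_count_and_order text_array_int → Pre_find_longest_consecutive_count_and_order text_array_int → Spec_find_longest_consecutive_count_and_order text_array_int (find_longest_consecutive_count_and_order text_array_int)

-- ===== LEMMAS AND PROOFS =====

-- A-side characterisation: the best run count reachable from state (current = c, previous = a)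
def pvBest (c : Int) (a : Int) : List Int → Int
  | [] => c
  | b :: t => if b = a + 1 then pvBest (c + 1) b t else max c (pvBest 1 b t)

-- B-side characterisation: run lengths emitted from state (current = c, previous = a)
def pvBestRuns (c : Int) (a : Int) : List Int → List Int
  | [] => [c]
  | b :: t => if b = a + 1 then pvBestRuns (c + 1) b t else c :: pvBestRuns 1 b t

theorem foldl_max_max (l : List Int) (a b : Int) :
    l.foldl max (max a b) = max a (l.foldl max b) := by
  induction l generalizing b with
  | nil => simp
  | cons x t ih =>
    simp only [List.foldl_cons, max_assoc]
    exact ih (max b x)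

theorem le_foldl_max (l : List Int) (a : Int) : a ≤ l.foldl max a := by
  induction l generalizing a with
  | nil => simp
  | cons x t ih =>
    simp only [List.foldl_cons]
    exact le_trans (le_max_left a x) (ih (max a x))

theorem pvBest_eq_foldl (t : List Int) (c a : Int) (hc : 0 ≤ c) :
    pvBest c a t = (pvBestRuns c a t).foldl max 0 := by
  induction t generalizing c a with
  | nil => simp [pvBest, pvBestRuns, max_eq_right hc]
  | cons b t ih =>
    simp only [pvBest, pvBestRuns]
    split
    · exact ih (c + 1) b (by omega)
    · rw [List.foldl_cons, show max 0 c = max c 0 from max_comm 0 c,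
        foldl_max_max, ih 1 b (by omega)]

theorem pvBestRuns_eq (t : List Int) (a c : Int) :
    pvBestRuns c a t =
      (c - 1 + (pvRunPrefix (a :: t) : Int)) :: pvRunLengths ((a :: t).drop (pvRunPrefix (a :: t))) := by
  induction t generalizing a c with
  | nil => simp [pvBestRuns, pvRunPrefix, pvRunLengths]
  | cons b t ih =>
    by_cases h : b = a + 1
    · have hk := pvRunPrefix_pos b t
      have hdrop : (a :: b :: t).drop (1 + pvRunPrefix (b :: t))
          = (b :: t).drop (pvRunPrefix (b :: t)) := by
        rw [Nat.add_comm]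
        exact List.drop_succ_cons
      simp only [pvBestRuns, pvRunPrefix, if_pos h, ih b (c + 1), hdrop,
        List.cons.injEq]
      constructor
      · push_cast; ring
      · trivial
    · simp only [pvBestRuns, pvRunPrefix, if_neg h]
      have hrest : pvBestRuns 1 b t = pvRunLengths (b :: t) := by
        rw [ih b 1, pvRunLengths]
        norm_num
      rw [hrest]
      norm_num

theorem pvRunLengths_eq_bestRuns (a : Int) (t : List Int) :
    pvRunLengths (a :: t) = pvBestRuns 1 a t := by
  rw [pvBestRuns_eq, pvRunLengths]
  norm_num

-- the step function of A's fold
def pvStepA (s : Bool × Int × Int × Int) (xi : Int) : Bool × Int × Int × Int :=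
  let ooo := if xi < s.2.2.2 then true else s.1
  let p := if xi = s.2.2.2 + 1 then (s.2.1, s.2.2.1 + 1) else (max s.2.1 s.2.2.1, 1)
  (ooo, p.1, p.2, xi)

theorem foldA_fst (t : List Int) (ooo : Bool) (lcc ccc prev : Int) :
    (t.foldl pvStepA (ooo, lcc, ccc, prev)).1
      = (ooo || ((prev :: t).zip t).any (fun p => decide (p.2 < p.1))) := by
  induction t generalizing ooo lcc ccc prev with
  | nil => simp
  | cons y t ih =>
    simp only [List.foldl_cons, pvStepA, List.zip_cons_cons, List.any_cons, ih]
    by_cases h : y < prev <;> simp [h]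

theorem foldA_max (t : List Int) (ooo : Bool) (lcc ccc prev : Int) :
    max (t.foldl pvStepA (ooo, lcc, ccc, prev)).2.1
        (t.foldl pvStepA (ooo, lcc, ccc, prev)).2.2.1
      = max lcc (pvBest ccc prev t) := by
  induction t generalizing ooo lcc ccc prev with
  | nil => simp [pvBest]
  | cons y t ih =>
    simp only [List.foldl_cons, pvStepA, pvBest]
    by_cases h : y = prev + 1
    · simp only [if_pos h]
      exact ih _ _ _ _
    · simp only [if_neg h]
      rw [ih _ _ _ _, max_assoc]

-- ===== VERDICT (by name: the statement is the Claim_ definition above) =====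
theorem find_longest_consecutive_count_and_order_spec : Claim_equal_find_longest_consecutive_count_and_order := by
  intro xs _ hpre
  unfold Spec_find_longest_consecutive_count_and_order
  match xs with
  | [] => exact absurd rfl hpre
  | x :: rest =>
    have h1 := foldA_max rest false 0 1 x
    have h2 := foldA_fst rest false 0 1 x
    have hbr := pvBestRuns_eq rest x 1
    have hk := pvRunPrefix_pos x rest
    have hm : (0 : Int) ≤ 1 - 1 + (pvRunPrefix (x :: rest) : Int) := by
      push_cast; omega
    show (let st := rest.foldl pvStepA (false, 0, 1, x); (max st.2.1 st.2.2.1, st.1))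
        = find_longest_consecutive_count_and_order_alt (x :: rest)
    unfold find_longest_consecutive_count_and_order_alt
    refine Prod.ext ?_ ?_
    · show max (rest.foldl pvStepA (false, 0, 1, x)).2.1
          (rest.foldl pvStepA (false, 0, 1, x)).2.2.1 = _
      rw [h1, pvBest_eq_foldl rest 1 x (by norm_num),
        show pvRunLengths (x :: rest) = pvBestRuns 1 x rest from
          pvRunLengths_eq_bestRuns x rest, hbr]
      show max 0 (List.foldl max 0 (_ :: _)) = List.foldl max _ _
      rw [List.foldl_cons, max_eq_right hm,
        max_eq_right (le_trans hm (le_foldl_max _ _))]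
    · show (rest.foldl pvStepA (false, 0, 1, x)).1 = _
      rw [h2]
      simp
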